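-- pv_equiv track=rewrite | github.com/n-ponto/AutoScribe | PyScripts/Planning Algorithm Testing/LineDrawer.py | bresenhamFromHere
-- ===== SOURCE A (Python) =====
-- def bresenhamFromHere(xIn, yIn):
--     moves = []
--     down = yIn < 0
--     back = xIn < 0
--     steep: bool = abs(yIn) > abs(xIn)
--
--     ydiff = -1 if down else 1
--     xdiff = -1 if back else 1
--
--     # Set the actual output
--     changeVal: tuple = xdiff, ydiff
--     if (steep):
--         changeOne = 0, ydiff
--     else:
--         changeOne = xdiff, 0
--
--     # Switch x and y for the algorithm
--     if (steep):
--         x, y = yIn, xIn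
--         xdiff, ydiff = ydiff, xdiff # switch directions
--     else:
--         x, y = xIn, yIn
--
--     m_new = 2 * abs(y)
--     absx = abs(x)
--     slope_error_new = m_new - absx
--     c = slope_error_new - absx
--     for i in range(absx):
--         if (slope_error_new >= 0): # change "y"
--             moves.append(changeVal)
--             slope_error_new += c
--         else: # don't change "y"
--             moves.append(changeOne)
--             slope_error_new += m_new
--
--     return moves
-- ===== SOURCE B (Python) =====
-- def bresenhamFromHere(xIn, yIn):
--     down = yIn < 0
--     back = xIn < 0
--     steep = abs(yIn) > abs(xIn)
--     ydiff = -1 if down else 1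
--     xdiff = -1 if back else 1
--     changeVal = xdiff, ydiff
--     changeOne = (0, ydiff) if steep else (xdiff, 0)
--     # axes after the steep swap
--     if steep:
--         absx, absy = abs(yIn), abs(xIn)
--     else:
--         absx, absy = abs(xIn), abs(yIn)
--     # closed-form DDA: minor-axis position after i major steps is
--     # (2*absy*i + absx) // (2*absx); emit changeVal exactly when it advances
--     return [changeVal
--             if (2 * absy * (i + 1) + absx) // (2 * absx) > (2 * absy * i + absx) // (2 * absx)
--             else changeOne
--             for i in range(absx)]
-- ===== Notes on version B (the rewrite author's own statement) =====
-- stated objective: alternative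
-- what changed: The incremental slope-error accumulator loop is replaced by a closed-form DDA: for each major-axis column i the minor-axis position (2*absy*i+absx)//(2*absx) is computed directly, and a diagonal move is emitted exactly when it advances.
import Mathlib
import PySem

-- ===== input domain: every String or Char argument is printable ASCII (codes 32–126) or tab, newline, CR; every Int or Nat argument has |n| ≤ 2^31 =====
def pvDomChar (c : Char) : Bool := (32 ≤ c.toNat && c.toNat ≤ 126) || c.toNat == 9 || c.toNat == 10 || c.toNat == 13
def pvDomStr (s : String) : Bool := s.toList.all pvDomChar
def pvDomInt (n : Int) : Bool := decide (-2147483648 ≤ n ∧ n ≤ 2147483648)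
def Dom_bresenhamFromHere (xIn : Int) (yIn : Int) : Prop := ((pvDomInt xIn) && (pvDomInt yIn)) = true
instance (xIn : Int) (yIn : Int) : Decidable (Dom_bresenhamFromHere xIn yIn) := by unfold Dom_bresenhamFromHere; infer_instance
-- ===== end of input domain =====

-- B replaces A's incremental slope-error loop by a closed-form DDA (per-column floor division); same setup, alternative algorithm.

-- ===== PORT A =====
-- the body of A's for-loop (accumulated moves list, current slope error)
def bresLoopA (changeVal changeOne : Int × Int) (c m_new : Int) :
    (List (Int × Int) × Int) → Int → (List (Int × Int) × Int) :=
  fun st _ =>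
    if st.2 ≥ 0 then (st.1 ++ [changeVal], st.2 + c)
    else (st.1 ++ [changeOne], st.2 + m_new)

def bresenhamFromHere (xIn : Int) (yIn : Int) : List (Int × Int) :=
  let down := yIn < 0
  let back := xIn < 0
  let steep := |yIn| > |xIn|
  let ydiff : Int := if down then -1 else 1
  let xdiff : Int := if back then -1 else 1
  let changeVal := (xdiff, ydiff)
  let changeOne := if steep then ((0 : Int), ydiff) else (xdiff, (0 : Int))
  -- Python also re-swaps xdiff/ydiff in the steep branch, but they are never read again
  let xy := if steep then (yIn, xIn) else (xIn, yIn)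
  let x := xy.1
  let y := xy.2
  let m_new := 2 * |y|
  let absx := |x|
  let slope_error_new := m_new - absx
  let c := slope_error_new - absx
  ((PySem.List.pyRange 0 absx 1).foldl (bresLoopA changeVal changeOne c m_new)
      ([], slope_error_new)).1

-- ===== PORT B =====
-- minor-axis position after i major steps (half-up rounding of b*i/a, via floor division)
def bresT (a b i : Int) : Int := PySem.Int.floordiv (2 * b * i + a) (2 * a)

def bresenhamFromHere_alt (xIn : Int) (yIn : Int) : List (Int × Int) :=
  let down := yIn < 0
  let back := xIn < 0
  let steep := |yIn| > |xIn|
  let ydiff : Int := if down then -1 else 1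
  let xdiff : Int := if back then -1 else 1
  let changeVal := (xdiff, ydiff)
  let changeOne := if steep then ((0 : Int), ydiff) else (xdiff, (0 : Int))
  let ab := if steep then (|yIn|, |xIn|) else (|xIn|, |yIn|)
  let absx := ab.1
  let absy := ab.2
  (PySem.List.pyRange 0 absx 1).map (fun i =>
    if bresT absx absy (i + 1) > bresT absx absy i then changeVal else changeOne)

-- ===== PRECONDITION & SPEC =====
def Spec_bresenhamFromHere (xIn : Int) (yIn : Int) (out : List (Int × Int)) : Prop := out = bresenhamFromHere_alt xIn yIn
instance (xIn : Int) (yIn : Int) (out : List (Int × Int)) : Decidable (Spec_bresenhamFromHere xIn yIn out) := by unfold Spec_bresenhamFromHere; infer_instance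

-- ===== CLAIM (what is proved, stated in full; the proofs are below) =====
def Claim_equal_bresenhamFromHere : Prop := ∀ (xIn : Int) (yIn : Int), Dom_bresenhamFromHere xIn yIn → Spec_bresenhamFromHere xIn yIn (bresenhamFromHere xIn yIn)

-- ===== LEMMAS AND PROOFS =====

lemma bresT_zero (a b : Int) (ha : 0 < a) : bresT a b 0 = 0 := by
  unfold bresT
  rw [PySem.Int.floordiv_eq_iff_of_pos (by omega)]
  constructor <;> nlinarith

lemma bresT_succ (a b i : Int) (ha : 0 < a) (hb : 0 ≤ b) (hba : b ≤ a) :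
    bresT a b (i + 1) =
      bresT a b i + (if 2 * b * (i + 1) - a - 2 * a * bresT a b i ≥ 0 then 1 else 0) := by
  have hmod := PySem.Int.floordiv_mul_add_mod (2 * b * i + a) (2 * a)
  have h1 : 0 ≤ PySem.Int.mod (2 * b * i + a) (2 * a) :=
    PySem.Int.mod_nonneg _ (by omega)
  have h2 : PySem.Int.mod (2 * b * i + a) (2 * a) < 2 * a :=
    PySem.Int.mod_lt _ (by omega)
  have hq : bresT a b i = PySem.Int.floordiv (2 * b * i + a) (2 * a) := rfl
  split_ifs with h
  · show bresT a b (i + 1) = bresT a b i + 1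
    unfold bresT
    rw [PySem.Int.floordiv_eq_iff_of_pos (by omega)]
    rw [hq] at h
    constructor <;> nlinarith
  · show bresT a b (i + 1) = bresT a b i + 0
    unfold bresT
    rw [PySem.Int.floordiv_eq_iff_of_pos (by omega)]
    rw [hq] at h
    constructor <;> nlinarith

lemma bres_loop_eq (a b : Int) (cv co : Int × Int) (ha : 0 < a) (hb : 0 ≤ b) (hba : b ≤ a) :
    ∀ n : Nat,
      (List.range n).foldl (fun st (k : Nat) => bresLoopA cv co (2 * b - a - a) (2 * b) st (k : Int))
          ([], 2 * b - a) =
        ((List.range n).map (fun k : Nat =>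
            if bresT a b ((k : Int) + 1) > bresT a b (k : Int) then cv else co),
          2 * b * ((n : Int) + 1) - a - 2 * a * bresT a b (n : Int)) := by
  intro n
  induction n with
  | zero =>
    simp [bresT_zero a b ha]
  | succ n ih =>
    rw [List.range_succ, List.foldl_append, List.map_append, ih]
    have hstep := bresT_succ a b (n : Int) ha hb hba
    simp only [List.foldl_cons, List.foldl_nil, bresLoopA, List.map_cons, List.map_nil]
    by_cases h : 2 * b * ((n : Int) + 1) - a - 2 * a * bresT a b (n : Int) ≥ 0
    · rw [if_pos h] at hstep
      rw [if_pos h, Prod.ext_iff]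
      refine ⟨?_, ?_⟩
      · have hgt : bresT a b ((n : Int) + 1) > bresT a b (n : Int) := by omega
        rw [if_pos hgt]
      · push_cast
        rw [hstep]
        ring
    · rw [if_neg h] at hstep
      rw [if_neg h, Prod.ext_iff]
      refine ⟨?_, ?_⟩
      · have hgt : ¬ bresT a b ((n : Int) + 1) > bresT a b (n : Int) := by omega
        rw [if_neg hgt]
      · push_cast
        rw [hstep]
        ring

lemma bres_key (a b : Int) (cv co : Int × Int) (ha : 0 ≤ a) (hb : 0 ≤ b) (hba : b ≤ a) :
    ((PySem.List.pyRange 0 a 1).foldl (bresLoopA cv co (2 * b - a - a) (2 * b))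
        ([], 2 * b - a)).1 =
      (PySem.List.pyRange 0 a 1).map (fun i => if bresT a b (i + 1) > bresT a b i then cv else co) := by
  rcases eq_or_lt_of_le ha with rfl | hpos
  · simp [PySem.List.pyRange]
  · obtain ⟨m, rfl⟩ : ∃ m : Nat, a = (m : Int) := ⟨a.toNat, by omega⟩
    rw [PySem.List.pyRange_zero_natCast, List.foldl_map, List.map_map]
    rw [bres_loop_eq (m : Int) b cv co hpos hb hba m]
    simp [Function.comp]

-- ===== VERDICT (by name: the statement is the Claim_ definition above) =====
theorem bresenhamFromHere_spec : Claim_equal_bresenhamFromHere := by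
  intro xIn yIn _
  unfold Spec_bresenhamFromHere bresenhamFromHere bresenhamFromHere_alt
  by_cases hs : |yIn| > |xIn|
  · simp only [hs, if_pos]
    exact bres_key |yIn| |xIn| _ _ (abs_nonneg _) (abs_nonneg _) (le_of_lt hs)
  · simp only [hs, if_false]
    exact bres_key |xIn| |yIn| _ _ (abs_nonneg _) (abs_nonneg _) (le_of_not_gt hs)
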